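-- pv_equiv track=rewrite | github.com/zhudaxia666/shuati | 返回合数是质数相乘.py | f
-- ===== SOURCE A (Python) =====
-- def f(n):
--     result=[]
--     i=2
--     str1=str(n)+'='
--     while n>1:
--         if i>0:
--             if n % i==0:
--                 n//=i
--                 result.append(str(i))
--                 i-=1
--         i+=1
--     str1+="*".join(result)
--     return str1
-- ===== SOURCE B (Python) =====
-- def f(n):
--     parts = []
--     m = n
--     i = 2
--     while i * i <= m:
--         if m % i == 0:
--             parts.append(str(i))
--             m //= i
--         else:
--             i += 1
--     if m > 1:
--         parts.append(str(m))
--     return str(n) + '=' + '*'.join(parts)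
-- ===== Notes on version B (the rewrite author's own statement) =====
-- stated objective: faster
-- what changed: B trial-divides only up to sqrt of the remaining cofactor and appends the remaining prime factor at the end, instead of A's scan of every candidate divisor up to n.
import Mathlib
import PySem

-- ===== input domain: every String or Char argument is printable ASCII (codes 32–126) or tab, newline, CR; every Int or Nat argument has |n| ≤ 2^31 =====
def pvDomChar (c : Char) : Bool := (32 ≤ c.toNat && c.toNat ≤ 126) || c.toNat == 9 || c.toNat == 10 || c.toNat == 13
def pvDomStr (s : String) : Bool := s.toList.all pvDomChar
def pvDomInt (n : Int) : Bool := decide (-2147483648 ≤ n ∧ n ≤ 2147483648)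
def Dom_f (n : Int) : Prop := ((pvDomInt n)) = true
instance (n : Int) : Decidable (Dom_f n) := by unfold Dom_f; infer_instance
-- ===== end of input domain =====

-- B factorizes by trial division only up to sqrt of the remaining cofactor (appending the
-- leftover prime at the end) instead of A's scan of every candidate up to n.

-- ===== PORT A =====
-- A's while-loop: state (n, i, result).  The Python's `i -= 1; i += 1` after a division
-- leaves i unchanged, written here as (i - 1 + 1).  The `fuel` parameter and the dite
-- guard `2 ≤ i ∧ i ≤ n` in addition to Python's `1 < n` are totality guards only: from
-- the entry state i = 2 the Python loop, whenever 1 < n, always has 2 ≤ i ≤ n (on states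
-- violating it Python diverges), and the entry fuel bounds the loop's iteration count.
def fLoopA (fuel : Nat) (n i : Int) (acc : List String) : List String :=
  match fuel with
  | 0 => acc
  | fuel + 1 =>
    if _h : 1 < n ∧ 2 ≤ i ∧ i ≤ n then
      if 0 < i then
        if PySem.Int.mod n i = 0 then
          fLoopA fuel (PySem.Int.floordiv n i) (i - 1 + 1) (acc ++ [PySem.Int.toStr i])
        else fLoopA fuel n (i + 1) acc
      else fLoopA fuel n (i + 1) acc
    else acc

def f (n : Int) : String :=
  PySem.Int.toStr n ++ "=" ++
    PySem.Str.join "*" (fLoopA (2 * n.toNat + (n + 1 - 2).toNat + 1) n 2 [])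

-- ===== PORT B =====
-- Source B's while-loop: state (m, i, parts); returns the final (m, parts).  The `fuel` and
-- the extra `2 ≤ i` in the guard are totality guards only (see fLoopA's comment).
def fLoopB (fuel : Nat) (m i : Int) (acc : List String) : Int × List String :=
  match fuel with
  | 0 => (m, acc)
  | fuel + 1 =>
    if _h : i * i ≤ m ∧ 2 ≤ i then
      if PySem.Int.mod m i = 0 then
        fLoopB fuel (PySem.Int.floordiv m i) i (acc ++ [PySem.Int.toStr i])
      else fLoopB fuel m (i + 1) acc
    else (m, acc)

def f_alt (n : Int) : String :=
  let p := fLoopB (2 * n.toNat + (n + 1 - 2).toNat + 1) n 2 []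
  let parts := if 1 < p.1 then p.2 ++ [PySem.Int.toStr p.1] else p.2
  PySem.Int.toStr n ++ "=" ++ PySem.Str.join "*" parts

-- ===== PRECONDITION & SPEC =====
def Spec_f (n : Int) (out : String) : Prop := out = f_alt n
instance (n : Int) (out : String) : Decidable (Spec_f n out) := by unfold Spec_f; infer_instance

-- ===== CLAIM (what is proved, stated in full; the proofs are below) =====
def Claim_equal_f : Prop := ∀ (n : Int), Dom_f n → Spec_f n (f n)

-- ===== LEMMAS AND PROOFS =====

-- If n has no divisor below i, none equal to i, and i*i > n, then it has none below n at all.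
lemma no_small_dvd (n i : Int) (hi2 : 2 ≤ i) (_hn : 1 < n) (hii : n < i * i)
    (hinv : ∀ j, 2 ≤ j → j < i → ¬ j ∣ n) (hnd : ¬ i ∣ n) :
    ∀ j, 2 ≤ j → j < n → ¬ j ∣ n := by
  intro j hj2 hjn hdvd
  rcases lt_trichotomy j i with h | h | h
  · exact hinv j hj2 h hdvd
  · exact hnd (h ▸ hdvd)
  · have hjpos : (0:Int) < j := by omega
    have hq : j * (n / j) = n := Int.mul_ediv_cancel' hdvd
    set q := n / j with hqdef
    have hq1 : 1 ≤ q := (Int.le_ediv_iff_mul_le hjpos).2 (by omega : 1 * j ≤ n)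
    have hqdvd : q ∣ n := ⟨j, by rw [← hq]; ring⟩
    have hqlt : q < i := by nlinarith
    have hq2 : 2 ≤ q := by
      rcases eq_or_lt_of_le hq1 with h1 | h1
      · exfalso; nlinarith
      · omega
    exact hinv q hq2 hqlt hqdvd

-- Tail of A's loop on a number with no proper divisor: counts i up to n, appends str n.
lemma loopA_prime : ∀ (fuel : Nat) (n i : Int) (acc : List String),
    (n - i).toNat + 2 ≤ fuel → 2 ≤ i → i ≤ n → (∀ j, 2 ≤ j → j < n → ¬ j ∣ n) →
    fLoopA fuel n i acc = acc ++ [PySem.Int.toStr n] := by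
  intro fuel
  induction fuel with
  | zero => intro n i acc hd; omega
  | succ fuel ih =>
    intro n i acc hd hi2 hin hpr
    rcases eq_or_lt_of_le hin with hie | hilt
    · subst hie
      have hmod : PySem.Int.mod i i = 0 := (PySem.Int.mod_eq_zero_iff_dvd i i).mpr dvd_rfl
      rw [fLoopA, dif_pos ⟨by omega, by omega, le_refl i⟩, if_pos (by omega : (0:Int) < i),
        if_pos hmod]
      have hdiv : PySem.Int.floordiv i i = 1 := by
        rw [PySem.Int.floordiv_eq_ediv_of_pos (by omega), Int.ediv_self (by omega)]
      rw [hdiv]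
      obtain ⟨k, rfl⟩ : ∃ k, fuel = k + 1 := ⟨fuel - 1, by omega⟩
      rw [fLoopA, dif_neg (by omega)]
    · have hmod : PySem.Int.mod n i ≠ 0 := by
        intro h
        exact hpr i hi2 hilt ((PySem.Int.mod_eq_zero_iff_dvd n i).mp h)
      rw [fLoopA, dif_pos ⟨by omega, hi2, hin⟩, if_pos (by omega : (0:Int) < i), if_neg hmod]
      exact ih n (i + 1) acc (by omega) (by omega) (by omega) hpr

-- Main invariant lemma: while no candidate below i divides n, A's loop equals B's loop
-- followed by appending the leftover cofactor when it exceeds 1 (each run on enough fuel).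
lemma loop_main : ∀ (fa : Nat) (fb : Nat) (n i : Int) (acc : List String),
    2 * n.toNat + (n + 1 - i).toNat < fa → 2 * n.toNat + (n + 1 - i).toNat < fb →
    2 ≤ i → (∀ j, 2 ≤ j → j < i → ¬ j ∣ n) →
    fLoopA fa n i acc =
      (let p := fLoopB fb n i acc
       if 1 < p.1 then p.2 ++ [PySem.Int.toStr p.1] else p.2) := by
  intro fa
  induction fa with
  | zero => intro fb n i acc hka; omega
  | succ fa ih =>
    intro fb n i acc hka hkb hi2 hinv
    obtain ⟨kb, rfl⟩ : ∃ k, fb = k + 1 := ⟨fb - 1, by omega⟩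
    by_cases hn : 1 < n
    · have hile : i ≤ n := by
        by_contra hgt
        exact hinv n (by omega) (by omega) dvd_rfl
      by_cases hmod : PySem.Int.mod n i = 0
      · have hdvd : i ∣ n := (PySem.Int.mod_eq_zero_iff_dvd n i).mp hmod
        have hpos : (0:Int) < i := by omega
        have hq : i * (n / i) = n := Int.mul_ediv_cancel' hdvd
        have hfd : PySem.Int.floordiv n i = n / i :=
          PySem.Int.floordiv_eq_ediv_of_pos hpos
        have hq1 : 1 ≤ n / i := (Int.le_ediv_iff_mul_le hpos).2 (by omega : 1 * i ≤ n)
        by_cases hii : i * i ≤ n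
        · -- both loops divide out i and continue
          rw [fLoopA, dif_pos ⟨hn, hi2, hile⟩, if_pos hpos, if_pos hmod,
              fLoopB, dif_pos ⟨hii, hi2⟩, if_pos hmod]
          have hstep : i - 1 + 1 = i := by omega
          rw [hstep, hfd]
          have hqlt : n / i < n := by nlinarith
          have h2q : 2 * (n / i) ≤ n := by nlinarith
          refine ih kb (n / i) i (acc ++ [PySem.Int.toStr i]) (by omega) (by omega) hi2 ?_
          intro j hj2 hji hjd
          exact hinv j hj2 hji (hjd.trans ⟨i, by rw [mul_comm]; exact hq.symm⟩)
        · -- B's loop exits; A divides once more: here n = i (the cofactor is 1)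
          have hqlt : n / i < i := by nlinarith
          have hq1e : n / i = 1 := by
            rcases eq_or_lt_of_le hq1 with h1 | h1
            · omega
            · exact absurd ⟨i, by rw [mul_comm]; exact hq.symm⟩
                (hinv (n / i) (by omega) hqlt)
          have hne : n = i := by nlinarith
          rw [fLoopA, dif_pos ⟨hn, hi2, hile⟩, if_pos hpos, if_pos hmod, hfd, hq1e,
              fLoopB, dif_neg (by intro h; omega)]
          obtain ⟨k, rfl⟩ : ∃ k, fa = k + 1 := ⟨fa - 1, by omega⟩
          rw [fLoopA, dif_neg (by omega)]
          simp [hne, show (1:Int) < i by omega]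
      · by_cases hii : i * i ≤ n
        · -- both loops advance to i + 1
          rw [fLoopA, dif_pos ⟨hn, hi2, hile⟩, if_pos (by omega : (0:Int) < i), if_neg hmod,
              fLoopB, dif_pos ⟨hii, hi2⟩, if_neg hmod]
          refine ih kb n (i + 1) acc (by omega) (by omega) (by omega) ?_
          intro j hj2 hji hjd
          rcases lt_or_eq_of_le (by omega : j ≤ i) with h | h
          · exact hinv j hj2 h hjd
          · exact hmod ((PySem.Int.mod_eq_zero_iff_dvd n i).mpr (h ▸ hjd))
        · -- B's loop exits with cofactor n; A's loop walks on to n and appends it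
          have hndvd : ¬ i ∣ n := fun h => hmod ((PySem.Int.mod_eq_zero_iff_dvd n i).mpr h)
          have hpr := no_small_dvd n i hi2 hn (by omega) hinv hndvd
          have hilt : i < n := by
            rcases eq_or_lt_of_le hile with h | h
            · exact absurd ⟨1, by omega⟩ hndvd
            · exact h
          rw [fLoopA, dif_pos ⟨hn, hi2, hile⟩, if_pos (by omega : (0:Int) < i), if_neg hmod,
              fLoopB, dif_neg (by intro h; omega)]
          simp only [if_pos hn]
          exact loopA_prime fa n (i + 1) acc (by omega) (by omega) (by omega) hpr
    · rw [fLoopA, dif_neg (by omega), fLoopB, dif_neg (by intro h; nlinarith [h.1, h.2])]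
      simp [show ¬ (1:Int) < n by omega]

-- ===== VERDICT (by name: the statement is the Claim_ definition above) =====
theorem f_spec : Claim_equal_f := by
  intro n _
  unfold Spec_f f f_alt
  rw [loop_main (2 * n.toNat + (n + 1 - 2).toNat + 1) (2 * n.toNat + (n + 1 - 2).toNat + 1)
    n 2 [] (by omega) (by omega) (by omega) (by intro j hj2 hji; omega)]
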